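-- pv_equiv track=rewrite | github.com/timbernat/polymerist | polymerist/genutils/sequences/seqops.py | bin_ids_forming_sequence
-- ===== SOURCE A (Python) =====
-- from typing import Generator, Iterable, Sequence, TypeVar, Union
-- from copy import deepcopy
-- from collections import defaultdict, Counter
-- from itertools import count, product as cartesian_product
--
-- T = TypeVar('T') # generic type for sequence element
--
-- def is_unique(seq : Sequence) -> bool:
--     '''Whether or not a Sequence contains repeating items'''
--     return len(set(seq)) == len(seq)
--
-- def bin_ids_forming_sequence(sequence : Sequence[T], choice_bins : Sequence[Iterable[T]], draw_without_repeats : bool=True, unique_bins : bool=False) -> Generator[tuple[int, ...], None, None]: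
--     '''
--     Takes an ordered sequence of N objects of a given type and an ordered of any number of bins, each containing an arbitary amount of unordered objects of the same type
--     Generates all possible N-tuples of bin indices which could produce the target sequence when drawing from those bins in the
--
--     if draw_without_repeats=True, will respect the multiplicity of elements in each bin when drawing
--     (i.e. will never have a bin position appear for a given object more times that that object appears in the corresponding bin)
--
--     if unique_bins=True, will only allow each bin to be sampled from once, EVEN if that bin contains elements which may occur later in the sequence
--     '''
--     symbol_inventory = defaultdict(Counter) # keys are objects of type T ("symbols"), values give multiplicities of symbols keyed by bin position
--     for i, choice_bin in enumerate(choice_bins):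
--         for sym in choice_bin:
--             symbol_inventory[sym][i] += 1 # NOTE : implementation here requires that T be a hashable type
--
--     for idxs in cartesian_product(*(symbol_inventory[item].keys() for item in sequence)): # generate every valid sequence of bin positions WITHOUT regard to repetition or uniqueness
--         if unique_bins and not is_unique(idxs):
--             continue # skip non-unique bin choices if the option is set
--
--         if draw_without_repeats:
--             choice_inventory = deepcopy(symbol_inventory) # make a new copy for each path check
--             for i, sym in zip(idxs, sequence, strict=True):
--                 if choice_inventory[sym][i] == 0:
--                     overdrawn = True
--                     break
--                 choice_inventory[sym][i] -= 1
--             else: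
--                 overdrawn = False
--
--             if overdrawn:
--                 continue
--
--         yield idxs # only yield if all specified conditions are met
-- ===== SOURCE B (Python) =====
-- from typing import Generator, Iterable, Sequence, TypeVar
--
-- T = TypeVar('T')
--
-- def bin_ids_forming_sequence(sequence : Sequence[T], choice_bins : Sequence[Iterable[T]], draw_without_repeats : bool=True, unique_bins : bool=False) -> Generator[tuple[int, ...], None, None]:
--     '''Backtracking DFS over bin choices with in-place draw/undo bookkeeping:
--     no per-candidate deepcopy and failing prefixes are pruned once instead of
--     being re-enumerated for every completion.'''
--     bins_for = {}    # symbol -> bin ids, in order of first appearance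
--     remaining = {}   # (symbol, bin id) -> multiplicity still drawable
--     for i, choice_bin in enumerate(choice_bins):
--         for sym in choice_bin:
--             if (sym, i) in remaining:
--                 remaining[(sym, i)] += 1
--             else:
--                 remaining[(sym, i)] = 1
--                 bins_for.setdefault(sym, []).append(i)
--
--     def dfs(pos, prefix, used):
--         if pos == len(sequence):
--             yield tuple(prefix)
--             return
--         sym = sequence[pos]
--         for i in bins_for.get(sym, ()):
--             if unique_bins and i in used:
--                 continue
--             if draw_without_repeats and remaining[(sym, i)] == 0:
--                 continue
--             remaining[(sym, i)] -= 1
--             used.add(i)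
--             prefix.append(i)
--             yield from dfs(pos + 1, prefix, used)
--             prefix.pop()
--             used.discard(i)
--             remaining[(sym, i)] += 1
--
--     yield from dfs(0, [], set())
-- ===== Notes on version B (the rewrite author's own statement) =====
-- stated objective: faster
-- what changed: Replaced A's enumeration of the full cartesian product with a per-candidate deepcopy of the whole symbol inventory by a backtracking DFS that keeps one shared (symbol,bin) remaining-count table and a used-bin set updated and undone in place, so failing prefixes are pruned once instead of re-checked for every completion.
import Mathlib
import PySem

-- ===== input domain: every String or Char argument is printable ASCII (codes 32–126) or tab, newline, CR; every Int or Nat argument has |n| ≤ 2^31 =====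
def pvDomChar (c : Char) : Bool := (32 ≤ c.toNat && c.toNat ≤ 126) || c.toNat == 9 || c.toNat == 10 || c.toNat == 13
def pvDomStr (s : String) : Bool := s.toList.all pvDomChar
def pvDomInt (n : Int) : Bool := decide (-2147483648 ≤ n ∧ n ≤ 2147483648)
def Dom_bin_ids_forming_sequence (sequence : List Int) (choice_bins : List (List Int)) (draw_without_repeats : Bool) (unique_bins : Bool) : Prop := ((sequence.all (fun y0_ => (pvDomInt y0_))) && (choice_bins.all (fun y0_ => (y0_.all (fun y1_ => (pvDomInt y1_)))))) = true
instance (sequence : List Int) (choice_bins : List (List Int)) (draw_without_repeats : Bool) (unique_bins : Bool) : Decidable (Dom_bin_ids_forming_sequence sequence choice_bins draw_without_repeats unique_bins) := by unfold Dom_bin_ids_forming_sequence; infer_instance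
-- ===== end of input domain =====

-- B replaces A's filtered cartesian product (with a deepcopy of the whole symbol inventory
-- per candidate tuple) by a backtracking DFS with incremental draw/undo bookkeeping, which
-- prunes failing prefixes instead of re-enumerating every completion of them.
-- Both programs are generators in Python; the ports return the list of yielded tuples.

-- ===== PORT A =====
-- helper is_unique: len(set(seq)) == len(seq)
def pvIsUnique (seq : List Int) : Bool :=
  (PySem.Set.ofList seq).length == seq.length

-- the for/else loop over zip(idxs, sequence) checking and decrementing the deepcopied
-- inventory; returns the final value of `overdrawn` (the deepcopy is the fresh `inv`
-- argument each call; zip(..., strict=True) never raises since both lists have equal length)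
def pvOverdrawnA (inv : PySem.Dict Int (PySem.Dict Int Int)) : List (Int × Int) → Bool
  | [] => false
  | (i, sym) :: rest =>
    if (inv.getD sym PySem.Dict.empty).getD i 0 == 0 then true
    else pvOverdrawnA (inv.modify sym PySem.Dict.empty (fun c => c.modify i 0 (· - 1))) rest

-- itertools.product(*pools): rightmost pool varies fastest
def pvProduct : List (List Int) → List (List Int)
  | [] => [[]]
  | pool :: pools => pool.flatMap (fun x => (pvProduct pools).map (fun t => x :: t))

def bin_ids_forming_sequence (sequence : List Int) (choice_bins : List (List Int)) (draw_without_repeats : Bool) (unique_bins : Bool) : List (List Int) :=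
  -- symbol_inventory: defaultdict(Counter); symbol_inventory[sym][i] += 1
  let symbol_inventory : PySem.Dict Int (PySem.Dict Int Int) :=
    (PySem.List.enumerate choice_bins).foldl (fun d p =>
      p.2.foldl (fun d sym => d.modify sym PySem.Dict.empty (fun c => c.modify p.1 0 (· + 1))) d)
      PySem.Dict.empty
  -- symbol_inventory[item].keys() for item in sequence (a missing item contributes no keys,
  -- exactly as the defaultdict's freshly inserted empty Counter does)
  let pools := sequence.map (fun item => (symbol_inventory.getD item PySem.Dict.empty).keys)
  (pvProduct pools).foldl (fun acc idxs =>
    if unique_bins && !(pvIsUnique idxs) then acc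
    else if draw_without_repeats then
      if pvOverdrawnA symbol_inventory (idxs.zip sequence) then acc
      else acc ++ [idxs]
    else acc ++ [idxs]) []

-- ===== PORT B =====
-- def dfs(pos, prefix, used): backtracking generator; the Lean rendering returns the list of
-- completed suffixes and conses the chosen bin id in front (= prefix.append / prefix.pop)
def pvDfsB (bins_for : PySem.Dict Int (List Int)) (draw unique : Bool) :
    List Int → PySem.Dict (Int × Int) Int → PySem.Set Int → List (List Int)
  | [], _, _ => [[]]
  | sym :: rest, remaining, used =>
    (bins_for.getD sym []).flatMap (fun i =>
      if unique && PySem.Set.contains used i then []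
      else if draw && (remaining.getD (sym, i) 0 == 0) then []
      else (pvDfsB bins_for draw unique rest
              (remaining.modify (sym, i) 0 (fun n => n - 1))
              (PySem.Set.add used i)).map (fun t => i :: t))

def bin_ids_forming_sequence_alt (sequence : List Int) (choice_bins : List (List Int)) (draw_without_repeats : Bool) (unique_bins : Bool) : List (List Int) :=
  -- build bins_for (symbol -> bin ids, first-appearance order) and remaining ((symbol, bin) -> count)
  let st : PySem.Dict Int (List Int) × PySem.Dict (Int × Int) Int :=
    (PySem.List.enumerate choice_bins).foldl (fun st p =>
      p.2.foldl (fun st sym =>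
        if st.2.contains (sym, p.1) then (st.1, st.2.modify (sym, p.1) 0 (fun n => n + 1))
        else (st.1.modify sym [] (fun l => l ++ [p.1]), st.2.insert (sym, p.1) 1)) st)
      (PySem.Dict.empty, PySem.Dict.empty)
  pvDfsB st.1 draw_without_repeats unique_bins sequence st.2 PySem.Set.empty

-- ===== PRECONDITION & SPEC =====
def Spec_bin_ids_forming_sequence (sequence : List Int) (choice_bins : List (List Int)) (draw_without_repeats : Bool) (unique_bins : Bool) (out : List (List Int)) : Prop := out = bin_ids_forming_sequence_alt sequence choice_bins draw_without_repeats unique_bins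
instance (sequence : List Int) (choice_bins : List (List Int)) (draw_without_repeats : Bool) (unique_bins : Bool) (out : List (List Int)) : Decidable (Spec_bin_ids_forming_sequence sequence choice_bins draw_without_repeats unique_bins out) := by unfold Spec_bin_ids_forming_sequence; infer_instance

-- ===== CLAIM (what is proved, stated in full; the proofs are below) =====
def Claim_equal_bin_ids_forming_sequence : Prop := ∀ (sequence : List Int) (choice_bins : List (List Int)) (draw_without_repeats : Bool) (unique_bins : Bool), Dom_bin_ids_forming_sequence sequence choice_bins draw_without_repeats unique_bins → Spec_bin_ids_forming_sequence sequence choice_bins draw_without_repeats unique_bins (bin_ids_forming_sequence sequence choice_bins draw_without_repeats unique_bins)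

-- ===== LEMMAS AND PROOFS =====

-- `okUniq used idxs`: no element of idxs repeats or lies in `used` (prefix form of is_unique)
def pvOkUniq (used : PySem.Set Int) : List Int → Bool
  | [] => true
  | i :: t => !(PySem.Set.contains used i) && pvOkUniq (PySem.Set.add used i) t

theorem pvOkUniq_iff (used : PySem.Set Int) (idxs : List Int) :
    pvOkUniq used idxs = true ↔ idxs.Nodup ∧ ∀ x ∈ idxs, x ∉ used := by
  induction idxs generalizing used with
  | nil => simp [pvOkUniq]
  | cons i t ih =>
    simp only [pvOkUniq, Bool.and_eq_true, Bool.not_eq_true', ih, List.nodup_cons]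
    have hci : (PySem.Set.contains used i = false) ↔ i ∉ used := by
      rw [← Bool.not_eq_true, not_iff_not]; exact PySem.Set.contains_iff used i
    rw [hci]
    constructor
    · rintro ⟨hc, hn, hmem⟩
      have hit : i ∉ t := fun h => hmem i h (by simp [PySem.Set.mem_add])
      refine ⟨⟨hit, hn⟩, ?_⟩
      intro x hx
      rcases List.mem_cons.1 hx with rfl | h
      · exact hc
      · exact fun hu => hmem x h ((PySem.Set.mem_add used i x).2 (Or.inl hu))
    · rintro ⟨⟨hit, hn⟩, hmem⟩
      refine ⟨hmem i (by simp), hn, ?_⟩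
      intro x hx hxa
      rcases (PySem.Set.mem_add used i x).1 hxa with h | rfl
      · exact hmem x (by simp [hx]) h
      · exact hit hx

theorem length_ofList_eq_iff (xs : List Int) :
    ((PySem.Set.ofList xs).length = xs.length) ↔ xs.Nodup := by
  induction xs using List.reverseRecOn with
  | nil => simp [PySem.Set.ofList]
  | append_singleton xs x ih =>
    rw [PySem.Set.ofList_append_singleton, PySem.Set.add_eq_ite]
    by_cases hx : x ∈ PySem.Set.ofList xs
    · have hxm : x ∈ xs := (PySem.Set.mem_ofList xs x).1 hx
      simp only [if_pos hx]
      constructor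
      · intro h
        have := PySem.Set.length_ofList_le xs
        simp [List.length_append] at h; omega
      · intro h; exact absurd hxm (by simp [List.nodup_append] at h; tauto)
    · have hxm : x ∉ xs := fun h => hx ((PySem.Set.mem_ofList xs x).2 h)
      simp only [if_neg hx]
      rw [List.length_append, List.length_append]
      simp only [List.length_singleton]
      constructor
      · intro h
        have hxs : xs.Nodup := ih.mp (by omega)
        exact (List.nodup_append).2 ⟨hxs, List.nodup_singleton x, by
          intro a ha b hb
          simp only [List.mem_singleton] at hb
          subst hb; exact fun hab => hxm (hab ▸ ha)⟩
      · intro h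
        have h' := (List.nodup_append).1 h
        rw [ih.mpr h'.1]

theorem pvIsUnique_eq (idxs : List Int) :
    pvIsUnique idxs = pvOkUniq PySem.Set.empty idxs := by
  have h1 : pvIsUnique idxs = true ↔ idxs.Nodup := by
    simp [pvIsUnique, length_ofList_eq_iff]
  have h2 := pvOkUniq_iff PySem.Set.empty idxs
  simp only [PySem.Set.empty] at h2
  by_cases h : idxs.Nodup
  · rw [h1.2 h, (h2.2 ⟨h, by simp [PySem.Set.empty]⟩).symm]
    simp [h2, h, PySem.Set.empty]
  · have : pvIsUnique idxs = false := by
      cases hh : pvIsUnique idxs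
      · rfl
      · exact absurd (h1.1 hh) h
    rw [this]
    cases hh : pvOkUniq PySem.Set.empty idxs
    · rfl
    · exact absurd ((pvOkUniq_iff _ _).1 hh).1 h

-- the state relation between A's (deepcopied, decremented) nested inventory and B's flat counter
def pvRelCnt (inv : PySem.Dict Int (PySem.Dict Int Int)) (rem : PySem.Dict (Int × Int) Int) : Prop :=
  ∀ sym i, (inv.getD sym PySem.Dict.empty).getD i 0 = rem.getD (sym, i) 0

def pvRel (inv : PySem.Dict Int (PySem.Dict Int Int)) (bf : PySem.Dict Int (List Int))
    (rem : PySem.Dict (Int × Int) Int) : Prop :=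
  (∀ sym, (inv.getD sym PySem.Dict.empty).keys = bf.getD sym []) ∧
  pvRelCnt inv rem ∧
  (∀ sym i, (inv.getD sym PySem.Dict.empty).contains i = rem.contains (sym, i))

theorem pvRel_step (inv : PySem.Dict Int (PySem.Dict Int Int)) (bf : PySem.Dict Int (List Int))
    (rem : PySem.Dict (Int × Int) Int) (sym i : Int) (h : pvRel inv bf rem) :
    pvRel (inv.modify sym PySem.Dict.empty (fun c => c.modify i 0 (fun n => n + 1)))
      (if rem.contains (sym, i) then bf else bf.modify sym [] (fun l => l ++ [i]))
      (if rem.contains (sym, i) then rem.modify (sym, i) 0 (fun n => n + 1) else rem.insert (sym, i) 1) := by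
  obtain ⟨h1, h2, h3⟩ := h
  cases hc : rem.contains (sym, i) with
  | true =>
    have hcA : (inv.getD sym PySem.Dict.empty).contains i = true := by rw [h3]; exact hc
    simp only [if_pos rfl, hc, if_true]
    refine ⟨?_, ?_, ?_⟩
    · intro sym'
      rw [PySem.Dict.getD_modify]
      by_cases hs : sym' = sym
      · subst hs
        rw [if_pos rfl, PySem.Dict.keys_modify, PySem.Dict.keys_insert_of_contains _ _ hcA, h1]
      · rw [if_neg hs, h1]
    · intro sym' i'
      rw [PySem.Dict.getD_modify, PySem.Dict.getD_modify]
      by_cases hs : sym' = sym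
      · subst hs
        rw [if_pos rfl, PySem.Dict.getD_modify]
        by_cases hi : i' = i
        · subst hi; rw [if_pos rfl, if_pos rfl, h2]
        · rw [if_neg hi, if_neg (by simp [Prod.ext_iff, hi]), h2]
      · rw [if_neg hs, if_neg (by simp [Prod.ext_iff, hs]), h2]
    · intro sym' i'
      rw [PySem.Dict.getD_modify, PySem.Dict.contains_modify]
      by_cases hs : sym' = sym
      · subst hs
        rw [if_pos rfl, PySem.Dict.contains_modify, h3]
        by_cases hi : i' = i
        · subst hi; simp
        · have e1 : (i' == i) = false := beq_false_of_ne hi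
          have e2 : (((sym', i') : Int × Int) == (sym', i)) = false :=
            beq_false_of_ne (by simp [Prod.ext_iff, hi])
          rw [e1, e2]
      · rw [if_neg hs, h3]
        simp [Prod.ext_iff, hs]
  | false =>
    have hcA : (inv.getD sym PySem.Dict.empty).contains i = false := by rw [h3]; exact hc
    simp only [hc, Bool.false_eq_true, if_false]
    refine ⟨?_, ?_, ?_⟩
    · intro sym'
      rw [PySem.Dict.getD_modify, PySem.Dict.getD_modify]
      by_cases hs : sym' = sym
      · subst hs
        rw [if_pos rfl, if_pos rfl, PySem.Dict.keys_modify,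
          PySem.Dict.keys_insert_of_not_contains _ _ hcA, h1]
      · rw [if_neg hs, if_neg hs, h1]
    · intro sym' i'
      rw [PySem.Dict.getD_modify, PySem.Dict.getD_insert]
      by_cases hs : sym' = sym
      · subst hs
        rw [if_pos rfl, PySem.Dict.getD_modify]
        by_cases hi : i' = i
        · subst hi
          rw [if_pos rfl, if_pos rfl, h2, PySem.Dict.getD_of_not_contains _ _ hc]
          norm_num
        · rw [if_neg hi, if_neg (by simp [Prod.ext_iff, hi]), h2]
      · rw [if_neg hs, if_neg (by simp [Prod.ext_iff, hs]), h2]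
    · intro sym' i'
      rw [PySem.Dict.getD_modify, PySem.Dict.contains_insert]
      by_cases hs : sym' = sym
      · subst hs
        rw [if_pos rfl, PySem.Dict.contains_modify, h3]
        by_cases hi : i' = i
        · subst hi; simp
        · have e1 : (i' == i) = false := beq_false_of_ne hi
          have e2 : (((sym', i') : Int × Int) == (sym', i)) = false :=
            beq_false_of_ne (by simp [Prod.ext_iff, hi])
          rw [e1, e2]
      · rw [if_neg hs, h3]
        simp [Prod.ext_iff, hs]

theorem pvRel_empty : pvRel PySem.Dict.empty PySem.Dict.empty PySem.Dict.empty := by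
  refine ⟨?_, ?_, ?_⟩ <;> intros <;>
    simp [PySem.Dict.getD_empty, PySem.Dict.contains_empty, PySem.Dict.keys_empty, pvRelCnt]

theorem pvRel_build_inner (syms : List Int) (i : Int)
    (inv : PySem.Dict Int (PySem.Dict Int Int)) (bf : PySem.Dict Int (List Int))
    (rem : PySem.Dict (Int × Int) Int) (h : pvRel inv bf rem) :
    pvRel
      (syms.foldl (fun d sym => d.modify sym PySem.Dict.empty (fun c => c.modify i 0 (fun n => n + 1))) inv)
      (syms.foldl (fun st sym =>
        if st.2.contains (sym, i) then (st.1, st.2.modify (sym, i) 0 (fun n => n + 1))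
        else (st.1.modify sym [] (fun l => l ++ [i]), st.2.insert (sym, i) 1)) (bf, rem)).1
      (syms.foldl (fun st sym =>
        if st.2.contains (sym, i) then (st.1, st.2.modify (sym, i) 0 (fun n => n + 1))
        else (st.1.modify sym [] (fun l => l ++ [i]), st.2.insert (sym, i) 1)) (bf, rem)).2 := by
  induction syms generalizing inv bf rem with
  | nil => exact h
  | cons sym rest ih =>
    simp only [List.foldl_cons]
    have hstep := pvRel_step inv bf rem sym i h
    cases hc : rem.contains (sym, i) with
    | true =>
      simp only [hc, if_true] at hstep ⊢
      exact ih _ _ _ hstep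
    | false =>
      simp only [hc, Bool.false_eq_true, if_false] at hstep ⊢
      exact ih _ _ _ hstep

theorem pvRel_build_pairs (pairs : List (Int × List Int))
    (inv : PySem.Dict Int (PySem.Dict Int Int)) (bf : PySem.Dict Int (List Int))
    (rem : PySem.Dict (Int × Int) Int) (h : pvRel inv bf rem) :
    pvRel
      (pairs.foldl (fun d p =>
        p.2.foldl (fun d sym => d.modify sym PySem.Dict.empty (fun c => c.modify p.1 0 (fun n => n + 1))) d) inv)
      (pairs.foldl (fun st p =>
        p.2.foldl (fun st sym =>
          if st.2.contains (sym, p.1) then (st.1, st.2.modify (sym, p.1) 0 (fun n => n + 1))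
          else (st.1.modify sym [] (fun l => l ++ [p.1]), st.2.insert (sym, p.1) 1)) st) (bf, rem)).1
      (pairs.foldl (fun st p =>
        p.2.foldl (fun st sym =>
          if st.2.contains (sym, p.1) then (st.1, st.2.modify (sym, p.1) 0 (fun n => n + 1))
          else (st.1.modify sym [] (fun l => l ++ [p.1]), st.2.insert (sym, p.1) 1)) st) (bf, rem)).2 := by
  induction pairs generalizing inv bf rem with
  | nil => exact h
  | cons p rest ih =>
    simp only [List.foldl_cons]
    have hin := pvRel_build_inner p.2 p.1 inv bf rem h
    simpa only [Prod.mk.eta] using ih _ _ _ hin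

theorem pvRel_build (choice_bins : List (List Int)) :
    pvRel
      ((PySem.List.enumerate choice_bins).foldl (fun d p =>
        p.2.foldl (fun d sym => d.modify sym PySem.Dict.empty (fun c => c.modify p.1 0 (fun n => n + 1))) d)
        PySem.Dict.empty)
      ((PySem.List.enumerate choice_bins).foldl (fun st p =>
        p.2.foldl (fun st sym =>
          if st.2.contains (sym, p.1) then (st.1, st.2.modify (sym, p.1) 0 (fun n => n + 1))
          else (st.1.modify sym [] (fun l => l ++ [p.1]), st.2.insert (sym, p.1) 1)) st)
        ((PySem.Dict.empty : PySem.Dict Int (List Int)), (PySem.Dict.empty : PySem.Dict (Int × Int) Int))).1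
      ((PySem.List.enumerate choice_bins).foldl (fun st p =>
        p.2.foldl (fun st sym =>
          if st.2.contains (sym, p.1) then (st.1, st.2.modify (sym, p.1) 0 (fun n => n + 1))
          else (st.1.modify sym [] (fun l => l ++ [p.1]), st.2.insert (sym, p.1) 1)) st)
        ((PySem.Dict.empty : PySem.Dict Int (List Int)), (PySem.Dict.empty : PySem.Dict (Int × Int) Int))).2 := by
  exact pvRel_build_pairs (PySem.List.enumerate choice_bins) PySem.Dict.empty PySem.Dict.empty PySem.Dict.empty pvRel_empty


theorem pvRelCnt_dec (inv : PySem.Dict Int (PySem.Dict Int Int)) (rem : PySem.Dict (Int × Int) Int)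
    (sym i : Int) (h : pvRelCnt inv rem) :
    pvRelCnt (inv.modify sym PySem.Dict.empty (fun c => c.modify i 0 (fun n => n - 1)))
      (rem.modify (sym, i) 0 (fun n => n - 1)) := by
  intro sym' i'
  rw [PySem.Dict.getD_modify, PySem.Dict.getD_modify]
  by_cases hs : sym' = sym
  · subst hs
    rw [if_pos rfl, PySem.Dict.getD_modify]
    by_cases hi : i' = i
    · subst hi; rw [if_pos rfl, if_pos rfl, h]
    · rw [if_neg hi, if_neg (by simp [Prod.ext_iff, hi]), h]
  · rw [if_neg hs, if_neg (by simp [Prod.ext_iff, hs]), h]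

theorem pvMain (bf : PySem.Dict Int (List Int)) (draw unique : Bool) (seq : List Int)
    (inv : PySem.Dict Int (PySem.Dict Int Int)) (rem : PySem.Dict (Int × Int) Int)
    (used : PySem.Set Int) (h : pvRelCnt inv rem) :
    (pvProduct (seq.map (fun s => bf.getD s []))).filter
      (fun idxs => !(unique && !(pvOkUniq used idxs)) && !(draw && pvOverdrawnA inv (idxs.zip seq)))
    = pvDfsB bf draw unique seq rem used := by
  induction seq generalizing inv rem used with
  | nil =>
    simp [pvProduct, pvDfsB, pvOkUniq, pvOverdrawnA, List.filter]
  | cons sym rest ih =>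
    simp only [List.map_cons, pvProduct, pvDfsB, List.filter_flatMap]
    congr 1
    funext i
    rw [List.filter_map]
    simp only [Function.comp_def]
    cases hcond : (unique && PySem.Set.contains used i) with
    | true =>
      have hu : unique = true := by cases unique <;> simp_all
      have hcon : PySem.Set.contains used i = true := by
        cases hx : PySem.Set.contains used i <;> simp_all
      have hp : ∀ t : List Int,
          (!(unique && !(pvOkUniq used (i :: t))) &&
            !(draw && pvOverdrawnA inv ((i :: t).zip (sym :: rest)))) = false := by
        intro t
        have hok : pvOkUniq used (i :: t) = false := by
          simp only [pvOkUniq, hcon, Bool.not_true, Bool.false_and]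
        rw [hok, hu]
        simp
      rw [List.filter_congr (fun t _ => hp t)]
      simp [hcond]
    | false =>
      cases hd : (draw && (rem.getD (sym, i) 0 == 0)) with
      | true =>
        have hdraw : draw = true := by cases draw <;> simp_all
        have h0 : rem.getD (sym, i) 0 = 0 := by
          have : (rem.getD (sym, i) 0 == 0) = true := by
            cases hx : (rem.getD (sym, i) 0 == 0) <;> simp_all
          exact beq_iff_eq.1 this
        have hA0 : (inv.getD sym PySem.Dict.empty).getD i 0 = 0 := by rw [h]; exact h0
        have hp : ∀ t : List Int,
            (!(unique && !(pvOkUniq used (i :: t))) &&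
              !(draw && pvOverdrawnA inv ((i :: t).zip (sym :: rest)))) = false := by
          intro t
          simp [List.zip_cons_cons, pvOverdrawnA, hA0, hdraw]
        rw [List.filter_congr (fun t _ => hp t)]
        simp [hcond, hd]
      | false =>
        have heq : ∀ t : List Int,
            (!(unique && !(pvOkUniq used (i :: t))) &&
              !(draw && pvOverdrawnA inv ((i :: t).zip (sym :: rest)))) =
            (!(unique && !(pvOkUniq (PySem.Set.add used i) t)) &&
              !(draw && pvOverdrawnA
                  (inv.modify sym PySem.Dict.empty (fun c => c.modify i 0 (fun n => n - 1)))
                  (t.zip rest))) := by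
          intro t
          have huniq : (unique && !(pvOkUniq used (i :: t))) =
              (unique && !(pvOkUniq (PySem.Set.add used i) t)) := by
            cases hu : unique with
            | false => simp
            | true =>
              have hcon : PySem.Set.contains used i = false := by
                cases hx : PySem.Set.contains used i <;> simp_all
              have hok : pvOkUniq used (i :: t) = pvOkUniq (PySem.Set.add used i) t := by
                simp only [pvOkUniq, hcon, Bool.not_false, Bool.true_and]
              rw [hok]
          have hover : (draw && pvOverdrawnA inv ((i :: t).zip (sym :: rest))) =
              (draw && pvOverdrawnA
                (inv.modify sym PySem.Dict.empty (fun c => c.modify i 0 (fun n => n - 1)))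
                (t.zip rest)) := by
            cases hdr : draw with
            | false => simp
            | true =>
              have hne : ((inv.getD sym PySem.Dict.empty).getD i 0 == 0) = false := by
                have : (rem.getD (sym, i) 0 == 0) = false := by
                  cases hx : (rem.getD (sym, i) 0 == 0) <;> simp_all
                rw [h]; exact this
              simp only [List.zip_cons_cons, pvOverdrawnA, hne, Bool.false_eq_true, if_false]
          rw [huniq, hover]
        rw [List.filter_congr (fun t _ => heq t),
          ih (inv.modify sym PySem.Dict.empty (fun c => c.modify i 0 (fun n => n - 1)))
            (rem.modify (sym, i) 0 (fun n => n - 1)) (PySem.Set.add used i)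
            (pvRelCnt_dec inv rem sym i h)]
        simp [hcond, hd]

theorem pvLoopFilter (inv : PySem.Dict Int (PySem.Dict Int Int)) (seq : List Int)
    (draw unique : Bool) (pp : List (List Int)) :
    pp.foldl (fun acc idxs =>
      if unique && !(pvIsUnique idxs) then acc
      else if draw then
        if pvOverdrawnA inv (idxs.zip seq) then acc
        else acc ++ [idxs]
      else acc ++ [idxs]) []
    = pp.filter (fun idxs =>
        !(unique && !(pvOkUniq PySem.Set.empty idxs)) && !(draw && pvOverdrawnA inv (idxs.zip seq))) := by
  have hbody : (fun (acc : List (List Int)) idxs =>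
      if unique && !(pvIsUnique idxs) then acc
      else if draw then
        if pvOverdrawnA inv (idxs.zip seq) then acc
        else acc ++ [idxs]
      else acc ++ [idxs])
    = fun acc idxs =>
      if (!(unique && !(pvOkUniq PySem.Set.empty idxs)) && !(draw && pvOverdrawnA inv (idxs.zip seq))) then acc ++ [idxs]
      else acc := by
    funext acc idxs
    rw [pvIsUnique_eq]
    cases hu : (unique && !(pvOkUniq PySem.Set.empty idxs)) <;> cases draw <;>
      cases hov : pvOverdrawnA inv (idxs.zip seq) <;> simp [hu, hov]
  rw [hbody, PySem.List.foldl_append_if_eq_filter]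
  simp

theorem pvFinal (sequence : List Int) (inv : PySem.Dict Int (PySem.Dict Int Int))
    (bf : PySem.Dict Int (List Int)) (rem : PySem.Dict (Int × Int) Int) (draw unique : Bool)
    (h1 : ∀ sym, (inv.getD sym PySem.Dict.empty).keys = bf.getD sym [])
    (h2 : pvRelCnt inv rem) :
    (pvProduct (sequence.map (fun item => (inv.getD item PySem.Dict.empty).keys))).foldl
      (fun acc idxs =>
        if unique && !(pvIsUnique idxs) then acc
        else if draw then
          if pvOverdrawnA inv (idxs.zip sequence) then acc
          else acc ++ [idxs]
        else acc ++ [idxs]) []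
    = pvDfsB bf draw unique sequence rem PySem.Set.empty := by
  have hpools : sequence.map (fun item => (inv.getD item PySem.Dict.empty).keys)
      = sequence.map (fun s => bf.getD s []) := by
    simp only [h1]
  rw [hpools, pvLoopFilter inv sequence draw unique,
    pvMain bf draw unique sequence inv rem PySem.Set.empty h2]

-- ===== VERDICT (by name: the statement is the Claim_ definition above) =====
theorem bin_ids_forming_sequence_spec : Claim_equal_bin_ids_forming_sequence := by
  intro sequence choice_bins draw unique _
  unfold Spec_bin_ids_forming_sequence bin_ids_forming_sequence bin_ids_forming_sequence_alt
  obtain ⟨h1, h2, -⟩ := pvRel_build choice_bins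
  exact pvFinal sequence _ _ _ draw unique h1 h2
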